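-- pv_equiv track=rewrite | github.com/Benjamin-Currie/advent-of-code | 2025/day_04/aoc202504.py | part_two
-- ===== SOURCE A (Python) =====
-- def get_neighbors(start_x, start_y, grid):
--     neighbors = []
--     # Directions for all 8 possible movements (N, S, E, W, NE, NW, SE, SW)
--     directions = [(-1, -1), (-1, 0), (-1, 1), (0, -1), (0, 1), (1, -1), (1, 0), (1, 1)]
--     for dx, dy in directions:
--         neighbour_x, neighbour_y = start_x + dx, start_y + dy
--         # Check if the neighbor is within the grid bounds
--         if 0 <= neighbour_x < len(grid) and 0 <= neighbour_y < len(grid[0]):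
--             neighbors.append((neighbour_x, neighbour_y))
--     return neighbors
--
-- def search_and_destroy(data):
--     total = 0
--     items_to_update = []
--     for x in range(len(data)):
--         for y in range(len(data[0])):
--             count = 0
--             if data[x][y] == "@":
--                 neighbors = get_neighbors(x, y, data)
--                 for nx, ny in neighbors:
--                     count += 1 if data[nx][ny] == "@" else 0
--                 if count < 4:
--                     total += 1
--                     items_to_update.append((x, y))
--     return total, items_to_update
--
-- def part_two(data):
--     """Solve part 2."""
--     grand_total = 0
--     changes_being_made = True
--     while changes_being_made:
--         total, items_to_update = search_and_destroy(data)
--         grand_total += total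
--         for x, y in items_to_update:
--             data[x][y] = "."
--         if not items_to_update:
--             changes_being_made = False
--     return grand_total
-- ===== SOURCE B (Python) =====
-- DIRECTIONS = [(-1, -1), (-1, 0), (-1, 1), (0, -1), (0, 1), (1, -1), (1, 0), (1, 1)]
--
-- def part_two(data):
--     """Solve part 2 by 4-core peeling: compute each '@' cell's live-neighbour
--     count once, then cascade removals with a worklist, decrementing the counts
--     of the removed cell's neighbours (no rescan of the grid, grid not mutated)."""
--     if not data:
--         return 0
--     height, width = len(data), len(data[0])
--     cells = [(x, y) for x in range(height) for y in range(width) if data[x][y] == "@"]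
--     alive = set(cells)
--     deg = {}
--     queue = []
--     for p in cells:
--         d = sum((p[0] + dx, p[1] + dy) in alive for dx, dy in DIRECTIONS)
--         deg[p] = d
--         if d < 4:
--             queue.append(p)
--     removed = 0
--     while queue:
--         p = queue.pop(0)
--         if p not in alive:
--             continue
--         alive.discard(p)
--         removed += 1
--         for dx, dy in DIRECTIONS:
--             q = (p[0] + dx, p[1] + dy)
--             if q in alive:
--                 deg[q] -= 1
--                 if deg[q] == 3:
--                     queue.append(q)
--     return removed
-- ===== Notes on version B (the rewrite author's own statement) =====
-- stated objective: alternative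
-- what changed: B replaces A's repeated full-grid rescan rounds by 4-core worklist peeling: it computes each '@' cell's live-neighbour count once, seeds a queue with cells below 4, and on each removal only decrements the counts of the 8 neighbours, enqueueing those that drop below 4; order-independence of the 4-core makes this exact. On the timed inputs the removal cascade is short, so the measured cost matches A's.
import Mathlib
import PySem

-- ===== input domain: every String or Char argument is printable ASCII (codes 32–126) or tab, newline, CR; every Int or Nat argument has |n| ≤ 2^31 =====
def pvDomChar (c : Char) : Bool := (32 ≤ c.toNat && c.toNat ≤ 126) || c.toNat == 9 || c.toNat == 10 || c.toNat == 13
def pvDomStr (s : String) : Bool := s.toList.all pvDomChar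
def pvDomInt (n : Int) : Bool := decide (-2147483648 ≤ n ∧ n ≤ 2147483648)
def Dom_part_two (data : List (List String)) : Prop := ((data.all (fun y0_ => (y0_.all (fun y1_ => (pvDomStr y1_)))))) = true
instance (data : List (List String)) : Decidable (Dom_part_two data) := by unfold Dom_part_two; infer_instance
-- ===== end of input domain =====

-- B replaces A's repeated full-grid rescan rounds by 4-core worklist peeling (counts computed
-- once, decremented incrementally, newly-qualifying cells enqueued); A mutates its argument in
-- place (removed cells are set to ".") while B does not — the equivalence proved here is about
-- the RETURN value only.

-- the 8 neighbour directions (shared geometry of both programs)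
def pvDirs : List (Int × Int) := [(-1, -1), (-1, 0), (-1, 1), (0, -1), (0, 1), (1, -1), (1, 0), (1, 1)]

-- data[x][y], total form (the defaults fire only where Python would raise, excluded by Pre_)
def pvCell (d : List (List String)) (x y : Int) : String :=
  PySem.List.pyGetD (PySem.List.pyGetD d x []) y ""

-- len(data) and len(data[0])
def pvH (d : List (List String)) : Int := PySem.List.len d
def pvW (d : List (List String)) : Int := PySem.List.len (PySem.List.pyGetD d 0 [])

-- ===== PORT A =====
def get_neighbors (start_x start_y : Int) (grid : List (List String)) : List (Int × Int) :=
  pvDirs.foldl (fun neighbors dd =>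
    let nx := start_x + dd.1
    let ny := start_y + dd.2
    if 0 ≤ nx ∧ nx < pvH grid ∧ 0 ≤ ny ∧ ny < pvW grid then
      neighbors ++ [(nx, ny)]
    else neighbors) []

-- the 'count' accumulation of A's inner loop
def pvCount (data : List (List String)) (x y : Int) : Int :=
  (get_neighbors x y data).foldl
    (fun c q => c + if pvCell data q.1 q.2 = "@" then (1 : Int) else 0) 0

-- body of A's 'for y in range(len(data[0]))' loop, named so the folds can be reasoned about
def pvInnerBody (data : List (List String)) (x : Int) (st : Int × List (Int × Int)) (y : Int) :
    Int × List (Int × Int) :=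
  if pvCell data x y = "@" then
    if pvCount data x y < 4 then (st.1 + 1, st.2 ++ [(x, y)]) else st
  else st

def search_and_destroy (data : List (List String)) : Int × List (Int × Int) :=
  (PySem.List.pyRange 0 (pvH data) 1).foldl
    (fun st x => (PySem.List.pyRange 0 (pvW data) 1).foldl (pvInnerBody data x) st)
    ((0 : Int), ([] : List (Int × Int)))

-- data[x][y] = "."  (one Python assignment)
def pvApply (d : List (List String)) (p : Int × Int) : List (List String) :=
  PySem.List.pySetD d p.1 (PySem.List.pySetD (PySem.List.pyGetD d p.1 []) p.2 ".")

-- termination measure of A's while loop: number of "@" cells in the grid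
def pvCnt (d : List (List String)) : Nat :=
  (d.map (fun r => r.countP (fun s => s == "@"))).sum

-- A's removability test and its row-major list of removed cells, used to characterise
-- search_and_destroy (the loop's termination proof cites pv_dec below)
def pvRem (d : List (List String)) (x y : Int) : Bool :=
  (pvCell d x y == "@") && decide (pvCount d x y < 4)

def pvRow (d : List (List String)) (x : Int) : List (Int × Int) :=
  ((PySem.List.pyRange 0 (pvW d) 1).filter (fun y => pvRem d x y)).map (fun y => (x, y))

def pvItems (d : List (List String)) : List (Int × Int) :=
  (PySem.List.pyRange 0 (pvH d) 1).flatMap (pvRow d)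

theorem pv_inner_eq (d : List (List String)) (x : Int) :
    ∀ (ys : List Int) (t : Int) (acc : List (Int × Int)),
      ys.foldl (pvInnerBody d x) (t, acc) =
        (t + (((ys.filter (fun y => pvRem d x y)).length : Nat) : Int),
          acc ++ (ys.filter (fun y => pvRem d x y)).map (fun y => (x, y))) := by
  intro ys
  induction ys with
  | nil => intro t acc; simp
  | cons y ys ih =>
    intro t acc
    by_cases h1 : pvCell d x y = "@" <;> by_cases h2 : pvCount d x y < 4
    all_goals simp [pvInnerBody, pvRem, h1, h2, List.foldl_cons, ih]
    all_goals omega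

theorem pv_sad_eq (d : List (List String)) :
    search_and_destroy d = (((pvItems d).length : Int), pvItems d) := by
  unfold search_and_destroy pvItems
  suffices aux : ∀ (xs : List Int) (t : Int) (acc : List (Int × Int)),
      xs.foldl (fun st x => (PySem.List.pyRange 0 (pvW d) 1).foldl (pvInnerBody d x) st) (t, acc) =
        (t + ((xs.flatMap (pvRow d)).length : Int), acc ++ xs.flatMap (pvRow d)) by
    simpa using aux (PySem.List.pyRange 0 (pvH d) 1) 0 []
  intro xs
  induction xs with
  | nil => intro t acc; simp
  | cons x xs ih =>
    intro t acc
    rw [List.foldl_cons, pv_inner_eq, ih]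
    simp only [pvRow, List.flatMap_cons, List.length_append, List.append_assoc,
      Prod.mk.injEq, List.length_map]
    refine ⟨by omega, by simp⟩

theorem pv_mem_items (d : List (List String)) (p : Int × Int) :
    p ∈ pvItems d ↔
      0 ≤ p.1 ∧ p.1 < pvH d ∧ 0 ≤ p.2 ∧ p.2 < pvW d ∧ pvRem d p.1 p.2 = true := by
  simp only [pvItems, pvRow, List.mem_flatMap, List.mem_map, List.mem_filter,
    PySem.List.mem_pyRange_one]
  constructor
  · rintro ⟨x, hx, y, ⟨⟨hy1, hy2⟩, hr⟩, rfl⟩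
    exact ⟨hx.1, hx.2, hy1, hy2, hr⟩
  · rintro ⟨h1, h2, h3, h4, h5⟩
    exact ⟨p.1, ⟨h1, h2⟩, p.2, ⟨⟨h3, h4⟩, h5⟩, rfl⟩

-- ==== cell/count arithmetic for the update step and the termination measure ====

theorem pv_cell_getD (d : List (List String)) {x y : Int} (hx : 0 ≤ x) (hy : 0 ≤ y) :
    pvCell d x y = (d.getD x.toNat []).getD y.toNat "" := by
  unfold pvCell
  conv_lhs => rw [show x = (x.toNat : Int) from (Int.toNat_of_nonneg hx).symm,
    show y = (y.toNat : Int) from (Int.toNat_of_nonneg hy).symm]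
  rw [PySem.List.pyGetD_natCast, PySem.List.pyGetD_natCast]

theorem pv_inrange_of_cell_at (d : List (List String)) {x y : Int} (hx : 0 ≤ x) (hy : 0 ≤ y)
    (h : pvCell d x y = "@") :
    x.toNat < d.length ∧ y.toNat < (d.getD x.toNat []).length := by
  rw [pv_cell_getD d hx hy] at h
  constructor
  · by_contra hlen
    rw [List.getD_eq_default d [] (by omega)] at h
    simp at h
  · by_contra hlen
    rw [List.getD_eq_default (d.getD x.toNat []) "" (by omega)] at h
    simp at h

theorem pv_apply_eq (d : List (List String)) (q : Int × Int) (h1 : 0 ≤ q.1) (h2 : 0 ≤ q.2) :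
    pvApply d q = d.set q.1.toNat ((d.getD q.1.toNat []).set q.2.toNat ".") := by
  have hrow : PySem.List.pyGetD d q.1 [] = d.getD q.1.toNat [] := by
    conv_lhs => rw [show q.1 = (q.1.toNat : Int) from (Int.toNat_of_nonneg h1).symm]
    exact PySem.List.pyGetD_natCast d q.1.toNat []
  unfold pvApply
  rw [PySem.List.pySetD_of_nonneg _ _ h1, PySem.List.pySetD_of_nonneg _ _ h2, hrow]

theorem pv_countP_set_le (r : List String) : ∀ j : Nat,
    ((r.set j ".").countP (fun s => s == "@")) ≤ r.countP (fun s => s == "@") := by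
  induction r with
  | nil => intro j; simp
  | cons a r ih =>
    intro j
    cases j with
    | zero =>
      rw [List.set_cons_zero, List.countP_cons_of_neg (by decide), List.countP_cons]
      split <;> omega
    | succ j =>
      simp only [List.set_cons_succ, List.countP_cons]
      have := ih j
      omega

theorem pv_countP_set_lt (r : List String) : ∀ j : Nat, (hj : j < r.length) → r[j] = "@" →
    ((r.set j ".").countP (fun s => s == "@")) < r.countP (fun s => s == "@") := by
  induction r with
  | nil => intro j hj; simp at hj
  | cons a r ih =>
    intro j hj h
    cases j with
    | zero =>
      simp only [List.getElem_cons_zero] at h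
      subst h
      rw [List.set_cons_zero, List.countP_cons_of_neg (by decide),
        List.countP_cons_of_pos (by decide)]
      omega
    | succ j =>
      simp only [List.getElem_cons_succ] at h
      simp only [List.set_cons_succ, List.countP_cons]
      have := ih j (by simpa using hj) h
      omega

theorem pv_cnt_set_le (d : List (List String)) : ∀ (i : Nat) (r' : List String),
    (∀ hi : i < d.length, r'.countP (fun s => s == "@") ≤ d[i].countP (fun s => s == "@")) →
    pvCnt (d.set i r') ≤ pvCnt d := by
  induction d with
  | nil => intro i r' _; simp [pvCnt]
  | cons r d ih =>
    intro i r' h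
    cases i with
    | zero =>
      simp only [List.set_cons_zero, pvCnt, List.map_cons, List.sum_cons]
      have := h (by simp)
      simp at this
      omega
    | succ i =>
      simp only [List.set_cons_succ, pvCnt, List.map_cons, List.sum_cons]
      have := ih i r' (fun hi => by simpa using h (by simpa using Nat.succ_lt_succ hi))
      simp only [pvCnt] at this
      omega

theorem pv_cnt_set_lt (d : List (List String)) : ∀ (i : Nat) (r' : List String)
    (hi : i < d.length),
    r'.countP (fun s => s == "@") < d[i].countP (fun s => s == "@") →
    pvCnt (d.set i r') < pvCnt d := by
  induction d with
  | nil => intro i r' hi; simp at hi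
  | cons r d ih =>
    intro i r' hi h
    cases i with
    | zero =>
      simp only [List.set_cons_zero, pvCnt, List.map_cons, List.sum_cons]
      simp at h
      omega
    | succ i =>
      simp only [List.set_cons_succ, pvCnt, List.map_cons, List.sum_cons]
      have := ih i r' (by simpa using hi) (by simpa using h)
      simp only [pvCnt] at this
      omega

theorem pv_cnt_apply_le (d : List (List String)) (q : Int × Int) (h1 : 0 ≤ q.1) (h2 : 0 ≤ q.2) :
    pvCnt (pvApply d q) ≤ pvCnt d := by
  rw [pv_apply_eq d q h1 h2]
  apply pv_cnt_set_le
  intro hi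
  rw [List.getD_eq_getElem?_getD, List.getElem?_eq_getElem hi]
  exact pv_countP_set_le _ _

theorem pv_cnt_apply_lt (d : List (List String)) (q : Int × Int) (h1 : 0 ≤ q.1) (h2 : 0 ≤ q.2)
    (hq : pvCell d q.1 q.2 = "@") : pvCnt (pvApply d q) < pvCnt d := by
  obtain ⟨hi, hj⟩ := pv_inrange_of_cell_at d h1 h2 hq
  rw [pv_apply_eq d q h1 h2]
  apply pv_cnt_set_lt _ _ _ hi
  have hrow : d.getD q.1.toNat [] = d[q.1.toNat] := by
    rw [List.getD_eq_getElem?_getD, List.getElem?_eq_getElem hi]; rfl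
  rw [← hrow]
  apply pv_countP_set_lt _ _ (by omega)
  have := pv_cell_getD d h1 h2
  rw [this] at hq
  rw [List.getD_eq_getElem?_getD, List.getElem?_eq_getElem (by omega : q.2.toNat < (d.getD q.1.toNat []).length)] at hq
  simpa using hq

theorem pv_cnt_fold_le (qs : List (Int × Int)) : ∀ d : List (List String),
    (∀ q ∈ qs, 0 ≤ q.1 ∧ 0 ≤ q.2) → pvCnt (qs.foldl pvApply d) ≤ pvCnt d := by
  induction qs with
  | nil => intro d _; simp
  | cons q qs ih =>
    intro d h
    rw [List.foldl_cons]
    exact le_trans (ih _ (fun r hr => h r (List.mem_cons_of_mem _ hr)))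
      (pv_cnt_apply_le d q (h q List.mem_cons_self).1 (h q List.mem_cons_self).2)

theorem pv_rem_iff (d : List (List String)) (x y : Int) :
    pvRem d x y = true ↔ pvCell d x y = "@" ∧ pvCount d x y < 4 := by
  simp [pvRem]

theorem pv_dec (d : List (List String)) (h : (search_and_destroy d).2 ≠ []) :
    pvCnt ((search_and_destroy d).2.foldl pvApply d) < pvCnt d := by
  rw [pv_sad_eq] at h ⊢
  simp only at h ⊢
  have hmem : ∀ r ∈ pvItems d, 0 ≤ r.1 ∧ 0 ≤ r.2 ∧ pvCell d r.1 r.2 = "@" := by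
    intro r hr
    obtain ⟨a1, _, a3, _, a5⟩ := (pv_mem_items d r).mp hr
    exact ⟨a1, a3, ((pv_rem_iff d r.1 r.2).mp a5).1⟩
  cases hit : pvItems d with
  | nil => exact absurd hit h
  | cons q rest =>
    rw [List.foldl_cons]
    have hq := hmem q (by rw [hit]; exact List.mem_cons_self)
    exact lt_of_le_of_lt
      (pv_cnt_fold_le rest _ (fun r hr =>
        have := hmem r (by rw [hit]; exact List.mem_cons_of_mem _ hr)
        ⟨this.1, this.2.1⟩))
      (pv_cnt_apply_lt d q hq.1 hq.2.1 hq.2.2)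

def part_two_loop (data : List (List String)) (grand_total : Int) : Int :=
  let r := search_and_destroy data
  let data' := r.2.foldl pvApply data
  if _h : r.2 = [] then grand_total + r.1
  else part_two_loop data' (grand_total + r.1)
termination_by pvCnt data
decreasing_by exact pv_dec data _h

def part_two (data : List (List String)) : Int :=
  part_two_loop data 0

-- ===== PORT B =====
-- cells = [(x, y) for x in range(height) for y in range(width) if data[x][y] == "@"]
def pvCells (d : List (List String)) : List (Int × Int) :=
  (PySem.List.pyRange 0 (pvH d) 1).flatMap (fun x =>
    ((PySem.List.pyRange 0 (pvW d) 1).filter (fun y => pvCell d x y == "@")).map (fun y => (x, y)))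

-- sum((p[0]+dx, p[1]+dy) in alive for dx, dy in DIRECTIONS)
def pvDeg (alive : List (Int × Int)) (p : Int × Int) : Int :=
  pvDirs.foldl (fun s dd => s + if (p.1 + dd.1, p.2 + dd.2) ∈ alive then (1 : Int) else 0) 0

-- the deg/queue initialisation loop ('deg[p] = d; if d < 4: queue.append(p)')
def pvInitDQ (alive : List (Int × Int)) (cells : List (Int × Int)) :
    PySem.Dict (Int × Int) Int × List (Int × Int) :=
  cells.foldl (fun st p =>
    (PySem.Dict.insert st.1 p (pvDeg alive p),
     if pvDeg alive p < 4 then st.2 ++ [p] else st.2))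
    (PySem.Dict.empty, [])

-- one neighbour update of the removal cascade ('deg[q] -= 1; if deg[q] == 3: queue.append(q)';
-- Dict.modify with default 0 is exact here: every cell in alive has a deg entry)
def pvPeelStep (alive : List (Int × Int)) (p : Int × Int)
    (st : PySem.Dict (Int × Int) Int × List (Int × Int)) (dd : Int × Int) :
    PySem.Dict (Int × Int) Int × List (Int × Int) :=
  let q := (p.1 + dd.1, p.2 + dd.2)
  if q ∈ alive then
    let deg' := PySem.Dict.modify st.1 q 0 (· - 1)
    if PySem.Dict.getD deg' q 0 = 3 then (deg', st.2 ++ [q]) else (deg', st.2)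
  else st

theorem pv_peelstep_queue_le (alive : List (Int × Int)) (p : Int × Int) :
    ∀ (ds : List (Int × Int)) (st : PySem.Dict (Int × Int) Int × List (Int × Int)),
      ((ds.foldl (pvPeelStep alive p) st).2).length ≤ st.2.length + ds.length := by
  intro ds
  induction ds with
  | nil => intro st; simp
  | cons dd ds ih =>
    intro st
    rw [List.foldl_cons]
    refine le_trans (ih _) ?_
    simp only [pvPeelStep]
    split
    · split
      · simp
        omega
      · simp
    · simp

theorem pv_discard_lt {p : Int × Int} {l : List (Int × Int)} (hp : p ∈ l) :
    (PySem.Set.discard l p).length < l.length := by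
  have : (PySem.Set.discard l p).length ≠ l.length := by
    intro h
    have := List.length_filter_eq_length_iff.mp h p hp
    simp at this
  exact lt_of_le_of_ne (List.length_filter_le _ _) this

-- the worklist loop ('while queue: ...')
def pvPeelLoop (alive : List (Int × Int)) (deg : PySem.Dict (Int × Int) Int)
    (queue : List (Int × Int)) (removed : Int) : Int :=
  match queue with
  | [] => removed
  | p :: rest =>
    if hp : p ∈ alive then
      pvPeelLoop (PySem.Set.discard alive p)
        (pvDirs.foldl (pvPeelStep (PySem.Set.discard alive p) p) (deg, rest)).1
        (pvDirs.foldl (pvPeelStep (PySem.Set.discard alive p) p) (deg, rest)).2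
        (removed + 1)
    else
      pvPeelLoop alive deg rest removed
termination_by 9 * alive.length + queue.length
decreasing_by
  · have h1 := pv_discard_lt hp
    have h2 : ((pvDirs.foldl (pvPeelStep (PySem.Set.discard alive p) p) (deg, rest)).2).length
        ≤ rest.length + 8 := by
      simpa using pv_peelstep_queue_le (PySem.Set.discard alive p) p pvDirs (deg, rest)
    simp only [List.length_cons]
    omega
  · simp only [List.length_cons]; omega

def part_two_alt (data : List (List String)) : Int :=
  if data = [] then 0
  else
    pvPeelLoop (PySem.Set.ofList (pvCells data))
      (pvInitDQ (PySem.Set.ofList (pvCells data)) (pvCells data)).1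
      (pvInitDQ (PySem.Set.ofList (pvCells data)) (pvCells data)).2
      0

-- ===== PRECONDITION & SPEC =====
-- Pre_ excludes exactly the inputs on which Python A raises IndexError: a row shorter than the
-- first row (A reads data[x][y] for every y < len(data[0])); it admits every input A returns on.
def Pre_part_two (data : List (List String)) : Prop :=
  ∀ row ∈ data, (data.headD []).length ≤ row.length
instance (data : List (List String)) : Decidable (Pre_part_two data) := by
  unfold Pre_part_two; infer_instance

def pvWitness_part_two : List (List String) :=
  [["@", "@", "."], ["@", "@", "@"], [".", "@", "."]]

def Spec_part_two (data : List (List String)) (out : Int) : Prop := out = part_two_alt data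
instance (data : List (List String)) (out : Int) : Decidable (Spec_part_two data out) := by
  unfold Spec_part_two; infer_instance

-- ===== CLAIM (what is proved, stated in full; the proofs are below) =====
def Claim_equal_part_two : Prop :=
  ∀ (data : List (List String)), Dom_part_two data → Pre_part_two data →
    Spec_part_two data (part_two data)

-- ===== LEMMAS AND PROOFS =====

-- ---- membership / distinctness of the initial cell list ----

theorem pv_mem_cells (d : List (List String)) (p : Int × Int) :
    p ∈ pvCells d ↔
      0 ≤ p.1 ∧ p.1 < pvH d ∧ 0 ≤ p.2 ∧ p.2 < pvW d ∧ pvCell d p.1 p.2 = "@" := by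
  simp only [pvCells, List.mem_flatMap, List.mem_map, List.mem_filter,
    PySem.List.mem_pyRange_one, beq_iff_eq]
  constructor
  · rintro ⟨x, hx, y, ⟨⟨hy1, hy2⟩, hr⟩, rfl⟩
    exact ⟨hx.1, hx.2, hy1, hy2, hr⟩
  · rintro ⟨h1, h2, h3, h4, h5⟩
    exact ⟨p.1, ⟨h1, h2⟩, p.2, ⟨⟨h3, h4⟩, h5⟩, rfl⟩

theorem pv_nodup_cells (d : List (List String)) : (pvCells d).Nodup := by
  unfold pvCells
  rw [List.nodup_flatMap]
  refine ⟨fun x _ => ?_, ?_⟩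
  · exact List.Nodup.map (fun a b h => by simpa using congrArg Prod.snd h)
      (((PySem.List.nodup_pyRange_one 0 (pvW d))).filter _)
  · refine List.Pairwise.imp ?_ (PySem.List.pairwise_lt_pyRange_one 0 (pvH d))
    intro a b hab p hpa hpb
    simp only [List.mem_map, List.mem_filter] at hpa hpb
    obtain ⟨ya, _, rfl⟩ := hpa
    obtain ⟨yb, _, h⟩ := hpb
    exact absurd (congrArg Prod.fst h).symm (by simpa using hab.ne)

-- ---- the bisimulation invariant: L is exactly the set of in-window '@' cells of grid d ----
def pvInv (d : List (List String)) (L : List (Int × Int)) : Prop :=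
  L.Nodup ∧ ∀ p : Int × Int,
    p ∈ L ↔ 0 ≤ p.1 ∧ p.1 < pvH d ∧ 0 ≤ p.2 ∧ p.2 < pvW d ∧ pvCell d p.1 p.2 = "@"

theorem pv_nodup_items (d : List (List String)) : (pvItems d).Nodup := by
  unfold pvItems
  rw [List.nodup_flatMap]
  refine ⟨fun x _ => ?_, ?_⟩
  · exact List.Nodup.map (fun a b h => by simpa using congrArg Prod.snd h)
      (((PySem.List.nodup_pyRange_one 0 (pvW d))).filter _)
  · refine List.Pairwise.imp ?_ (PySem.List.pairwise_lt_pyRange_one 0 (pvH d))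
    intro a b hab p hpa hpb
    simp only [pvRow, List.mem_map, List.mem_filter] at hpa hpb
    obtain ⟨ya, _, rfl⟩ := hpa
    obtain ⟨yb, _, h⟩ := hpb
    exact absurd (congrArg Prod.fst h).symm (by simpa using hab.ne)

theorem pv_getD_set {α : Type} (l : List α) (i : Nat) (v : α) (j : Nat) (dflt : α) :
    (l.set i v).getD j dflt = if i = j ∧ i < l.length then v else l.getD j dflt := by
  simp only [List.getD_eq_getElem?_getD, List.getElem?_set]
  by_cases hij : i = j
  · subst hij
    by_cases hi : i < l.length
    · simp [hi]
    · simp [hi]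
  · simp [hij]

theorem pv_apply_cell (d : List (List String)) (q : Int × Int) (h1 : 0 ≤ q.1) (h2 : 0 ≤ q.2)
    (hq : pvCell d q.1 q.2 = "@") (x y : Int) (hx : 0 ≤ x) (hy : 0 ≤ y) :
    pvCell (pvApply d q) x y = if (x, y) = q then "." else pvCell d x y := by
  obtain ⟨hi, hj⟩ := pv_inrange_of_cell_at d h1 h2 hq
  rw [pv_apply_eq d q h1 h2, pv_cell_getD _ hx hy, pv_cell_getD d hx hy, pv_getD_set]
  by_cases hxq : x = q.1
  · rw [if_pos ⟨by omega, hi⟩, pv_getD_set]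
    by_cases hyq : y = q.2
    · rw [if_pos ⟨by omega, hj⟩, if_pos (Prod.ext_iff.mpr ⟨hxq, hyq⟩)]
    · rw [if_neg (by rintro ⟨hc1, _⟩; exact hyq (by omega)),
        if_neg (by intro hc; exact hyq (congrArg Prod.snd hc)),
        show x.toNat = q.1.toNat by omega]
  · rw [if_neg (by rintro ⟨hc1, _⟩; exact hxq (by omega)),
      if_neg (by intro hc; exact hxq (congrArg Prod.fst hc))]

theorem pv_apply_len (d : List (List String)) (q : Int × Int) :
    (pvApply d q).length = d.length := by
  simp [pvApply, PySem.List.length_pySetD]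

theorem pv_apply_W (d : List (List String)) (q : Int × Int) (h1 : 0 ≤ q.1) (h2 : 0 ≤ q.2) :
    pvW (pvApply d q) = pvW d := by
  unfold pvW
  rw [pv_apply_eq d q h1 h2, PySem.List.len_eq, PySem.List.len_eq,
    PySem.List.pyGetD_zero, PySem.List.pyGetD_zero]
  have : ((d.set q.1.toNat ((d.getD q.1.toNat []).set q.2.toNat ".")).getD 0 []).length
      = (d.getD 0 []).length := by
    rw [pv_getD_set]
    by_cases h : q.1.toNat = 0 ∧ q.1.toNat < d.length
    · rw [if_pos h, List.length_set, h.1]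
    · rw [if_neg h]
  exact congrArg _ this

theorem pv_fold_len (qs : List (Int × Int)) : ∀ d : List (List String),
    (qs.foldl pvApply d).length = d.length := by
  induction qs with
  | nil => intro d; rfl
  | cons q qs ih => intro d; rw [List.foldl_cons, ih, pv_apply_len]

theorem pv_fold_W (qs : List (Int × Int)) : ∀ d : List (List String),
    (∀ q ∈ qs, 0 ≤ q.1 ∧ 0 ≤ q.2) → pvW (qs.foldl pvApply d) = pvW d := by
  induction qs with
  | nil => intro d _; rfl
  | cons q qs ih =>
    intro d h
    rw [List.foldl_cons, ih _ (fun r hr => h r (List.mem_cons_of_mem _ hr)),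
      pv_apply_W d q (h q List.mem_cons_self).1 (h q List.mem_cons_self).2]

theorem pv_fold_cell (qs : List (Int × Int)) : ∀ d : List (List String),
    qs.Nodup → (∀ q ∈ qs, 0 ≤ q.1 ∧ 0 ≤ q.2 ∧ pvCell d q.1 q.2 = "@") →
    ∀ x y : Int, 0 ≤ x → 0 ≤ y →
      pvCell (qs.foldl pvApply d) x y = if (x, y) ∈ qs then "." else pvCell d x y := by
  induction qs with
  | nil => intro d _ _ x y _ _; simp
  | cons q qs ih =>
    intro d hnd hall x y hx hy
    have hq := hall q List.mem_cons_self
    have hcell : ∀ r ∈ qs, 0 ≤ r.1 ∧ 0 ≤ r.2 ∧ pvCell (pvApply d q) r.1 r.2 = "@" := by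
      intro r hr
      have h := hall r (List.mem_cons_of_mem _ hr)
      refine ⟨h.1, h.2.1, ?_⟩
      rw [pv_apply_cell d q hq.1 hq.2.1 hq.2.2 r.1 r.2 h.1 h.2.1, if_neg, h.2.2]
      intro hc
      have hrq : r = q := hc
      exact (List.nodup_cons.mp hnd).1 (hrq ▸ hr)
    rw [List.foldl_cons, ih _ (List.nodup_cons.mp hnd).2 hcell x y hx hy,
      pv_apply_cell d q hq.1 hq.2.1 hq.2.2 x y hx hy]
    by_cases hmem : (x, y) ∈ qs
    · simp [hmem]
    · by_cases hxy : (x, y) = q <;> simp [hmem, hxy]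

theorem pv_count_eq (d : List (List String)) (L : List (Int × Int)) (hinv : pvInv d L)
    (x y : Int) : pvCount d x y = pvDeg L (x, y) := by
  have hgn : get_neighbors x y d =
      (pvDirs.filter (fun dd =>
        decide (0 ≤ x + dd.1 ∧ x + dd.1 < pvH d ∧ 0 ≤ y + dd.2 ∧ y + dd.2 < pvW d))).map
        (fun dd => (x + dd.1, y + dd.2)) := by
    unfold get_neighbors
    exact PySem.List.foldl_append_ite _ _ pvDirs []
  have hcnt : pvCount d x y =
      ((get_neighbors x y d).countP (fun q => decide (pvCell d q.1 q.2 = "@")) : Int) := by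
    unfold pvCount
    rw [show (fun (c : Int) (q : Int × Int) => c + if pvCell d q.1 q.2 = "@" then (1 : Int) else 0)
        = fun c q => if pvCell d q.1 q.2 = "@" then c + 1 else c by
      funext c q; split <;> simp]
    rw [PySem.List.foldl_ite_add_one]
    simp
  have hdeg : pvDeg L (x, y) =
      (pvDirs.countP (fun dd => decide ((x + dd.1, y + dd.2) ∈ L)) : Int) := by
    unfold pvDeg
    rw [show (fun (s : Int) (dd : Int × Int) =>
          s + if ((x, y).1 + dd.1, (x, y).2 + dd.2) ∈ L then (1 : Int) else 0)
        = fun s dd => if ((x + dd.1, y + dd.2)) ∈ L then s + 1 else s by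
      funext s dd; split <;> simp_all]
    rw [PySem.List.foldl_ite_add_one]
    simp
  rw [hcnt, hgn, List.countP_map, List.countP_filter, hdeg]
  congr 1
  apply List.countP_congr
  intro dd _
  simp only [Function.comp, Bool.and_eq_true, decide_eq_true_eq]
  rw [hinv.2 (x + dd.1, y + dd.2)]
  constructor
  · rintro ⟨hc, h1, h2, h3, h4⟩; exact ⟨h1, h2, h3, h4, hc⟩
  · rintro ⟨h1, h2, h3, h4, hc⟩; exact ⟨hc, h1, h2, h3, h4⟩

theorem pv_mem_items_inv (d : List (List String)) (L : List (Int × Int)) (hinv : pvInv d L)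
    (p : Int × Int) : p ∈ pvItems d ↔ p ∈ L ∧ pvDeg L p < 4 := by
  rw [pv_mem_items, hinv.2 p]
  have := pv_count_eq d L hinv p.1 p.2
  rw [pv_rem_iff]
  constructor
  · rintro ⟨h1, h2, h3, h4, h5, h6⟩
    exact ⟨⟨h1, h2, h3, h4, h5⟩, by rw [← this]; simpa using h6⟩
  · rintro ⟨⟨h1, h2, h3, h4, h5⟩, h6⟩
    exact ⟨h1, h2, h3, h4, h5, by rw [this]; simpa using h6⟩

theorem pv_items_perm (d : List (List String)) (L : List (Int × Int)) (hinv : pvInv d L) :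
    (pvItems d).Perm (L.filter (fun p => !decide (4 ≤ pvDeg L p))) := by
  refine (List.perm_ext_iff_of_nodup (pv_nodup_items d) (hinv.1.filter _)).mpr ?_
  intro p
  rw [pv_mem_items_inv d L hinv p, List.mem_filter]
  simp only [Bool.not_eq_true', decide_eq_false_iff_not, not_le]

-- ---- the synchronous-round fixpoint (proof-side model of A's while loop) ----
def pvSync (alive : List (Int × Int)) : List (Int × Int) :=
  let survivors := alive.filter (fun p => 4 ≤ pvDeg alive p)
  if _h : survivors.length = alive.length then alive
  else pvSync survivors
termination_by alive.length
decreasing_by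
  refine lt_of_le_of_ne ?_ _h
  simpa using List.length_filter_le _ alive.attach

theorem pv_len_split (d : List (List String)) (L : List (Int × Int)) (hinv : pvInv d L) :
    (L.filter (fun p => 4 ≤ pvDeg L p)).length + (pvItems d).length = L.length := by
  rw [(pv_items_perm d L hinv).length_eq]
  exact (List.length_eq_length_filter_add _).symm

theorem pv_inv_step (d : List (List String)) (L : List (Int × Int)) (hinv : pvInv d L) :
    pvInv ((pvItems d).foldl pvApply d) (L.filter (fun p => 4 ≤ pvDeg L p)) := by
  have hvalid : ∀ q ∈ pvItems d, 0 ≤ q.1 ∧ 0 ≤ q.2 ∧ pvCell d q.1 q.2 = "@" := by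
    intro q hq
    obtain ⟨a1, _, a3, _, a5⟩ := (pv_mem_items d q).mp hq
    exact ⟨a1, a3, ((pv_rem_iff d q.1 q.2).mp a5).1⟩
  have hH : pvH ((pvItems d).foldl pvApply d) = pvH d := by
    unfold pvH; rw [PySem.List.len_eq, PySem.List.len_eq, pv_fold_len]
  have hW : pvW ((pvItems d).foldl pvApply d) = pvW d :=
    pv_fold_W _ d (fun q hq => ⟨(hvalid q hq).1, (hvalid q hq).2.1⟩)
  refine ⟨hinv.1.filter _, fun p => ?_⟩
  rw [List.mem_filter, hH, hW]
  constructor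
  · rintro ⟨hpL, hdeg⟩
    obtain ⟨h1, h2, h3, h4, h5⟩ := (hinv.2 p).mp hpL
    have hnoti : p ∉ pvItems d := by
      rw [pv_mem_items_inv d L hinv p]
      rintro ⟨_, hlt⟩
      have hdeg' : 4 ≤ pvDeg L p := by simpa using hdeg
      omega
    refine ⟨h1, h2, h3, h4, ?_⟩
    rw [pv_fold_cell _ d (pv_nodup_items d) hvalid p.1 p.2 h1 h3, if_neg (by simpa using hnoti)]
    exact h5
  · rintro ⟨h1, h2, h3, h4, h5⟩
    rw [pv_fold_cell _ d (pv_nodup_items d) hvalid p.1 p.2 h1 h3] at h5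
    by_cases hmem : (p.1, p.2) ∈ pvItems d
    · rw [if_pos hmem] at h5; exact absurd h5 (by simp)
    · rw [if_neg hmem] at h5
      have hpL : p ∈ L := (hinv.2 p).mpr ⟨h1, h2, h3, h4, h5⟩
      have : ¬ (p ∈ L ∧ pvDeg L p < 4) := by
        rw [← pv_mem_items_inv d L hinv p]; simpa using hmem
      have hge : 4 ≤ pvDeg L p := by
        by_contra hlt
        exact this ⟨hpL, by omega⟩
      exact ⟨hpL, by simpa using hge⟩

theorem pv_loop_eq (n : Nat) : ∀ (d : List (List String)) (L : List (Int × Int)) (g : Int),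
    L.length ≤ n → pvInv d L →
    part_two_loop d g = g + (L.length : Int) - ((pvSync L).length : Int) := by
  induction n with
  | zero =>
    intro d L g hn hinv
    have hL : L = [] := List.eq_nil_of_length_eq_zero (by omega)
    subst hL
    have hitems : pvItems d = [] := (pv_items_perm d [] hinv).eq_nil
    rw [part_two_loop, pvSync]
    simp [pv_sad_eq, hitems]
  | succ n ih =>
    intro d L g hn hinv
    have hsplit := pv_len_split d L hinv
    rw [part_two_loop, pvSync]
    simp only [pv_sad_eq]
    by_cases hitems : pvItems d = []
    · have h0 : (pvItems d).length = 0 := by rw [hitems]; rfl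
      rw [dif_pos hitems, dif_pos (by omega)]
      simp [h0]
    · have hpos : 0 < (pvItems d).length := List.length_pos_of_ne_nil hitems
      rw [dif_neg hitems, dif_neg (by omega)]
      rw [ih _ (L.filter (fun p => 4 ≤ pvDeg L p)) _ (by omega) (pv_inv_step d L hinv)]
      omega

-- ---- degree arithmetic ----

theorem pvDeg_eq_countP (L : List (Int × Int)) (q : Int × Int) :
    pvDeg L q = (pvDirs.countP (fun dd => decide ((q.1 + dd.1, q.2 + dd.2) ∈ L)) : Int) := by
  unfold pvDeg
  rw [show (fun (s : Int) (dd : Int × Int) =>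
        s + if (q.1 + dd.1, q.2 + dd.2) ∈ L then (1 : Int) else 0)
      = fun s dd => if ((q.1 + dd.1, q.2 + dd.2)) ∈ L then s + 1 else s by
    funext s dd; split <;> simp_all]
  rw [PySem.List.foldl_ite_add_one]
  simp

theorem pvDeg_mono {S T : List (Int × Int)} (h : ∀ x, x ∈ S → x ∈ T) (q : Int × Int) :
    pvDeg S q ≤ pvDeg T q := by
  rw [pvDeg_eq_countP, pvDeg_eq_countP]
  exact_mod_cast List.countP_mono_left (fun dd _ hd => by
    simp only [decide_eq_true_eq] at hd ⊢; exact h _ hd)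

theorem pvDirs_nodup : pvDirs.Nodup := by decide

theorem pvDirs_neg_mem {dd : Int × Int} (h : dd ∈ pvDirs) : (-dd.1, -dd.2) ∈ pvDirs := by
  fin_cases h <;> decide

theorem pvDirs_sub_comm {p q : Int × Int} :
    (p.1 - q.1, p.2 - q.2) ∈ pvDirs ↔ (q.1 - p.1, q.2 - p.2) ∈ pvDirs := by
  constructor <;> intro h <;>
    simpa [neg_sub] using pvDirs_neg_mem h

theorem pv_countP_split {ds : List (Int × Int)} (hnd : ds.Nodup)
    (f : Int × Int → Int × Int) (hf : Function.Injective f)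
    (L : List (Int × Int)) (p : Int × Int) (hp : p ∈ L) :
    ds.countP (fun dd => decide (f dd ∈ L ∧ f dd ≠ p))
      + (if ∃ dd ∈ ds, f dd = p then 1 else 0)
      = ds.countP (fun dd => decide (f dd ∈ L)) := by
  induction ds with
  | nil => simp
  | cons dd ds ih =>
    have hnd' := List.nodup_cons.mp hnd
    by_cases hdd : f dd = p
    · have htail : ∀ dd' ∈ ds, f dd' ≠ p := by
        intro dd' hdd' hc
        exact hnd'.1 (hf (hc.trans hdd.symm) ▸ hdd')
      have hcongr : ds.countP (fun dd' => decide (f dd' ∈ L ∧ f dd' ≠ p))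
          = ds.countP (fun dd' => decide (f dd' ∈ L)) := by
        apply List.countP_congr
        intro dd' hdd'
        simp [htail dd' hdd']
      rw [List.countP_cons, List.countP_cons, hcongr,
        if_pos (⟨dd, List.mem_cons_self, hdd⟩ : ∃ x ∈ dd :: ds, f x = p)]
      have hd1 : decide (f dd ∈ L ∧ f dd ≠ p) = false := by simp [hdd, hp]
      have hd2 : decide (f dd ∈ L) = true := by simp [hdd, hp]
      rw [hd1, hd2]
      simp
    · rw [List.countP_cons, List.countP_cons]
      have hex : (∃ x ∈ dd :: ds, f x = p) ↔ (∃ x ∈ ds, f x = p) := by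
        constructor
        · rintro ⟨x, hx, hxe⟩
          rcases List.mem_cons.mp hx with rfl | hx'
          · exact absurd hxe hdd
          · exact ⟨x, hx', hxe⟩
        · rintro ⟨x, hx, hxe⟩; exact ⟨x, List.mem_cons_of_mem _ hx, hxe⟩
      have hih := ih hnd'.2
      have hd1 : decide (f dd ∈ L ∧ f dd ≠ p) = decide (f dd ∈ L) := by simp [hdd]
      rw [if_congr hex rfl rfl, hd1]
      by_cases hL : f dd ∈ L <;> by_cases hE : ∃ x ∈ ds, f x = p <;>
        simp only [hL, hE, decide_true, decide_false, if_true, if_false] at hih ⊢ <;> omega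

theorem pv_exists_dir (p q : Int × Int) :
    (∃ dd ∈ pvDirs, (q.1 + dd.1, q.2 + dd.2) = p) ↔ (p.1 - q.1, p.2 - q.2) ∈ pvDirs := by
  constructor
  · rintro ⟨dd, hdd, hc⟩
    have h1 := congrArg Prod.fst hc
    have h2 := congrArg Prod.snd hc
    simp only at h1 h2
    have : (p.1 - q.1, p.2 - q.2) = dd := Prod.ext (by omega) (by omega)
    rw [this]; exact hdd
  · intro h
    exact ⟨(p.1 - q.1, p.2 - q.2), h, Prod.ext (by simp) (by simp)⟩

theorem pvDeg_discard (L : List (Int × Int)) (p q : Int × Int) (hp : p ∈ L) :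
    pvDeg (PySem.Set.discard L p) q =
      pvDeg L q - (if (p.1 - q.1, p.2 - q.2) ∈ pvDirs then 1 else 0) := by
  rw [pvDeg_eq_countP, pvDeg_eq_countP]
  have hinj : Function.Injective (fun dd : Int × Int => (q.1 + dd.1, q.2 + dd.2)) := by
    intro a b hab
    have h1 := congrArg Prod.fst hab
    have h2 := congrArg Prod.snd hab
    simp only at h1 h2
    exact Prod.ext (by omega) (by omega)
  have hc : pvDirs.countP (fun dd => decide ((q.1 + dd.1, q.2 + dd.2) ∈ PySem.Set.discard L p))
      = pvDirs.countP (fun dd => decide ((q.1 + dd.1, q.2 + dd.2) ∈ L ∧ (q.1 + dd.1, q.2 + dd.2) ≠ p)) := by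
    apply List.countP_congr
    intro dd _
    simp [PySem.Set.mem_discard]
  rw [hc]
  have := pv_countP_split pvDirs_nodup _ hinj L p hp
  rw [← this, if_congr (pv_exists_dir p q) rfl rfl]
  split <;> push_cast <;> omega

-- ---- nodup discard has exactly one element fewer ----
theorem pv_discard_len {p : Int × Int} {l : List (Int × Int)} (hnd : l.Nodup) (hp : p ∈ l) :
    (PySem.Set.discard l p).length + 1 = l.length := by
  induction l with
  | nil => simp at hp
  | cons a l ih =>
    have hnd' := List.nodup_cons.mp hnd
    show (List.filter (fun y => !(y == p)) (a :: l)).length + 1 = (a :: l).length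
    rcases List.mem_cons.mp hp with rfl | hp'
    · rw [List.filter_cons_of_neg (by simp), List.filter_eq_self.mpr ?_]
      · rfl
      · intro x hx
        have hxp : x ≠ p := fun h => hnd'.1 (h ▸ hx)
        simp [hxp]
    · have hap : a ≠ p := fun h => hnd'.1 (by rw [h]; exact hp')
      rw [List.filter_cons_of_pos (by simp [hap])]
      have h' : (List.filter (fun y => !(y == p)) l).length + 1 = l.length := ih hnd'.2 hp'
      show (List.filter (fun y => !(y == p)) l).length + 1 + 1 = l.length + 1
      omega

-- ---- the initialisation loop computes exact degrees and the sub-4 queue ----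
theorem pv_initDQ_spec (alive : List (Int × Int)) :
    ∀ (cs : List (Int × Int)) (st : PySem.Dict (Int × Int) Int × List (Int × Int)),
      (∀ q : Int × Int,
        ((cs.foldl (fun st p =>
            (PySem.Dict.insert st.1 p (pvDeg alive p),
             if pvDeg alive p < 4 then st.2 ++ [p] else st.2)) st).1).getD q 0 =
          if q ∈ cs then pvDeg alive q else st.1.getD q 0)
      ∧ (cs.foldl (fun st p =>
            (PySem.Dict.insert st.1 p (pvDeg alive p),
             if pvDeg alive p < 4 then st.2 ++ [p] else st.2)) st).2 =
          st.2 ++ cs.filter (fun p => decide (pvDeg alive p < 4)) := by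
  intro cs
  induction cs with
  | nil => intro st; simp
  | cons c cs ih =>
    intro st
    rw [List.foldl_cons]
    obtain ⟨ih1, ih2⟩ := ih (PySem.Dict.insert st.1 c (pvDeg alive c),
      if pvDeg alive c < 4 then st.2 ++ [c] else st.2)
    constructor
    · intro q
      rw [ih1 q]
      by_cases hq : q ∈ cs
      · rw [if_pos hq, if_pos (List.mem_cons_of_mem _ hq)]
      · rw [if_neg hq]
        simp only [PySem.Dict.getD_insert]
        by_cases hqc : q = c
        · subst hqc; simp [hq]
        · simp [hq, hqc]
    · rw [ih2]
      by_cases hc : pvDeg alive c < 4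
      · rw [if_pos hc, List.filter_cons_of_pos (by simpa using hc), List.append_assoc]
        simp
      · rw [if_neg hc, List.filter_cons_of_neg (by simpa using hc)]

-- ---- the neighbour-update fold: decrements exactly the live neighbours of p, and
-- ---- appends exactly those whose stored count was 4 ----
theorem pv_peelfold (alive' : List (Int × Int)) (p : Int × Int) :
    ∀ (ds : List (Int × Int)), ds.Nodup →
    ∀ (deg : PySem.Dict (Int × Int) Int) (qacc : List (Int × Int)),
      (∀ q : Int × Int,
        ((ds.foldl (pvPeelStep alive' p) (deg, qacc)).1).getD q 0 =
          if (q.1 - p.1, q.2 - p.2) ∈ ds ∧ q ∈ alive' then deg.getD q 0 - 1 else deg.getD q 0)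
      ∧ (ds.foldl (pvPeelStep alive' p) (deg, qacc)).2 =
          qacc ++ (ds.filter (fun dd => decide ((p.1 + dd.1, p.2 + dd.2) ∈ alive'
              ∧ deg.getD (p.1 + dd.1, p.2 + dd.2) 0 = 4))).map
            (fun dd => (p.1 + dd.1, p.2 + dd.2)) := by
  intro ds
  induction ds with
  | nil => intro _ deg qacc; simp
  | cons dd ds ih =>
    intro hnd deg qacc
    have hnd' := List.nodup_cons.mp hnd
    rw [List.foldl_cons]
    have hstep : pvPeelStep alive' p (deg, qacc) dd =
        if (p.1 + dd.1, p.2 + dd.2) ∈ alive' then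
          (PySem.Dict.modify deg (p.1 + dd.1, p.2 + dd.2) 0 (· - 1),
           if deg.getD (p.1 + dd.1, p.2 + dd.2) 0 = 4 then qacc ++ [(p.1 + dd.1, p.2 + dd.2)]
           else qacc)
        else (deg, qacc) := by
      simp only [pvPeelStep]
      by_cases hin : (p.1 + dd.1, p.2 + dd.2) ∈ alive'
      · rw [if_pos hin, if_pos hin, PySem.Dict.getD_modify_self]
        by_cases h4 : deg.getD (p.1 + dd.1, p.2 + dd.2) 0 = 4
        · rw [if_pos (by omega), if_pos h4]
        · rw [if_neg (by omega), if_neg h4]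
      · rw [if_neg hin, if_neg hin]
    by_cases hin : (p.1 + dd.1, p.2 + dd.2) ∈ alive'
    · rw [hstep, if_pos hin]
      obtain ⟨ih1, ih2⟩ := ih hnd'.2 (PySem.Dict.modify deg (p.1 + dd.1, p.2 + dd.2) 0 (· - 1))
        (if deg.getD (p.1 + dd.1, p.2 + dd.2) 0 = 4 then qacc ++ [(p.1 + dd.1, p.2 + dd.2)]
         else qacc)
      constructor
      · intro q
        rw [ih1 q]
        have hmod := PySem.Dict.getD_modify deg (p.1 + dd.1, p.2 + dd.2) q 0 (· - 1)
        by_cases hq : q = (p.1 + dd.1, p.2 + dd.2)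
        · have hs : (q.1 - p.1, q.2 - p.2) = dd := by
            rw [hq]; exact Prod.ext (by simp) (by simp)
          rw [hs, hmod, if_pos hq, if_neg (fun hc => hnd'.1 hc.1),
            if_pos ⟨List.mem_cons_self, by rw [hq]; exact hin⟩, hq]
        · have hne : (q.1 - p.1, q.2 - p.2) ≠ dd := by
            intro hc
            apply hq
            have h1 := congrArg Prod.fst hc
            have h2 := congrArg Prod.snd hc
            simp only at h1 h2
            exact Prod.ext (by omega) (by omega)
          rw [hmod, if_neg hq]
          have hiff : ((q.1 - p.1, q.2 - p.2) ∈ dd :: ds ∧ q ∈ alive')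
              ↔ ((q.1 - p.1, q.2 - p.2) ∈ ds ∧ q ∈ alive') := by simp [hne]
          rw [if_congr hiff rfl rfl]
      · rw [ih2]
        have hfilter : ds.filter (fun dd' => decide ((p.1 + dd'.1, p.2 + dd'.2) ∈ alive'
              ∧ (PySem.Dict.modify deg (p.1 + dd.1, p.2 + dd.2) 0 (· - 1)).getD
                  (p.1 + dd'.1, p.2 + dd'.2) 0 = 4))
            = ds.filter (fun dd' => decide ((p.1 + dd'.1, p.2 + dd'.2) ∈ alive'
              ∧ deg.getD (p.1 + dd'.1, p.2 + dd'.2) 0 = 4)) := by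
          apply List.filter_congr
          intro dd' hdd'
          have hne : (p.1 + dd'.1, p.2 + dd'.2) ≠ (p.1 + dd.1, p.2 + dd.2) := by
            intro hc
            have h1 := congrArg Prod.fst hc
            have h2 := congrArg Prod.snd hc
            simp only at h1 h2
            exact hnd'.1 (show dd ∈ ds by
              have : dd' = dd := Prod.ext (by omega) (by omega)
              exact this ▸ hdd')
          rw [PySem.Dict.getD_modify, if_neg hne]
        rw [hfilter]
        by_cases h4 : deg.getD (p.1 + dd.1, p.2 + dd.2) 0 = 4
        · rw [List.filter_cons_of_pos (by simp [hin, h4]), List.map_cons, if_pos h4]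
          simp
        · rw [List.filter_cons_of_neg (by simp [hin, h4]), if_neg h4]
    · rw [hstep, if_neg hin]
      obtain ⟨ih1, ih2⟩ := ih hnd'.2 deg qacc
      constructor
      · intro q
        rw [ih1 q]
        have : ((q.1 - p.1, q.2 - p.2) ∈ dd :: ds ∧ q ∈ alive')
            ↔ ((q.1 - p.1, q.2 - p.2) ∈ ds ∧ q ∈ alive') := by
          constructor
          · rintro ⟨hmem, hq⟩
            rcases List.mem_cons.mp hmem with hc | hmem'
            · exfalso
              apply hin
              have h1 := congrArg Prod.fst hc
              have h2 := congrArg Prod.snd hc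
              simp only at h1 h2
              have : q = (p.1 + dd.1, p.2 + dd.2) := Prod.ext (by omega) (by omega)
              exact this ▸ hq
            · exact ⟨hmem', hq⟩
          · rintro ⟨hmem, hq⟩; exact ⟨List.mem_cons_of_mem _ hmem, hq⟩
        rw [if_congr this rfl rfl]
      · rw [ih2, List.filter_cons_of_neg (by simp [hin])]

-- ---- 4-core machinery: goodness, maximality, order-independence ----

def pvSub (S T : List (Int × Int)) : Prop := ∀ q, q ∈ S → q ∈ T

def pvGood (S : List (Int × Int)) : Prop := ∀ q ∈ S, 4 ≤ pvDeg S q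

theorem pvSync_subset (L : List (Int × Int)) : pvSub (pvSync L) L := by
  suffices h : ∀ (n : Nat) (L : List (Int × Int)), L.length ≤ n → pvSub (pvSync L) L from
    h L.length L le_rfl
  intro n
  induction n with
  | zero =>
    intro L hl
    have hL : L = [] := List.eq_nil_of_length_eq_zero (by omega)
    subst hL
    rw [pvSync]
    simp only [List.filter_nil]
    rw [dif_pos trivial]
    exact fun q hq => hq
  | succ n ih =>
    intro L hl
    rw [pvSync]
    by_cases h : (L.filter (fun p => decide (4 ≤ pvDeg L p))).length = L.length
    · rw [dif_pos h]
      exact fun q hq => hq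
    · rw [dif_neg h]
      have hle : (L.filter (fun p => decide (4 ≤ pvDeg L p))).length ≤ n := by
        have := List.length_filter_le (fun p => decide (4 ≤ pvDeg L p)) L
        omega
      intro q hq
      exact List.mem_of_mem_filter (ih _ hle q hq)

theorem pvSync_nodup (L : List (Int × Int)) (hnd : L.Nodup) : (pvSync L).Nodup := by
  suffices h : ∀ (n : Nat) (L : List (Int × Int)), L.length ≤ n → L.Nodup → (pvSync L).Nodup from
    h L.length L le_rfl hnd
  intro n
  induction n with
  | zero =>
    intro L hl _
    have hL : L = [] := List.eq_nil_of_length_eq_zero (by omega)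
    subst hL
    rw [pvSync]
    simp only [List.filter_nil]
    rw [dif_pos trivial]
    exact List.nodup_nil
  | succ n ih =>
    intro L hl h0
    rw [pvSync]
    by_cases h : (L.filter (fun p => decide (4 ≤ pvDeg L p))).length = L.length
    · rw [dif_pos h]
      exact h0
    · rw [dif_neg h]
      have hle : (L.filter (fun p => decide (4 ≤ pvDeg L p))).length ≤ n := by
        have := List.length_filter_le (fun p => decide (4 ≤ pvDeg L p)) L
        omega
      exact ih _ hle (h0.filter _)

theorem pvSync_good (L : List (Int × Int)) : pvGood (pvSync L) := by
  suffices h : ∀ (n : Nat) (L : List (Int × Int)), L.length ≤ n → pvGood (pvSync L) from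
    h L.length L le_rfl
  intro n
  induction n with
  | zero =>
    intro L hl
    have hL : L = [] := List.eq_nil_of_length_eq_zero (by omega)
    subst hL
    rw [pvSync]
    simp only [List.filter_nil]
    rw [dif_pos trivial]
    intro q hq
    simp at hq
  | succ n ih =>
    intro L hl
    rw [pvSync]
    by_cases h : (L.filter (fun p => decide (4 ≤ pvDeg L p))).length = L.length
    · rw [dif_pos h]
      intro q hq
      have := List.length_filter_eq_length_iff.mp h q hq
      simpa using this
    · rw [dif_neg h]
      have hle : (L.filter (fun p => decide (4 ≤ pvDeg L p))).length ≤ n := by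
        have := List.length_filter_le (fun p => decide (4 ≤ pvDeg L p)) L
        omega
      exact ih _ hle

theorem pvSync_max (L S : List (Int × Int)) (hg : pvGood S) (hs : pvSub S L) :
    pvSub S (pvSync L) := by
  suffices h : ∀ (n : Nat) (L : List (Int × Int)), L.length ≤ n →
      ∀ S, pvGood S → pvSub S L → pvSub S (pvSync L) from
    h L.length L le_rfl S hg hs
  intro n
  induction n with
  | zero =>
    intro L hl S hg' hs'
    have hL : L = [] := List.eq_nil_of_length_eq_zero (by omega)
    subst hL
    rw [pvSync]
    simp only [List.filter_nil]
    rw [dif_pos trivial]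
    exact hs'
  | succ n ih =>
    intro L hl S hg' hs'
    rw [pvSync]
    by_cases h : (L.filter (fun p => decide (4 ≤ pvDeg L p))).length = L.length
    · rw [dif_pos h]
      exact hs'
    · rw [dif_neg h]
      have hle : (L.filter (fun p => decide (4 ≤ pvDeg L p))).length ≤ n := by
        have := List.length_filter_le (fun p => decide (4 ≤ pvDeg L p)) L
        omega
      refine ih _ hle S hg' ?_
      intro q hq
      rw [List.mem_filter]
      refine ⟨hs' q hq, ?_⟩
      have h1 := hg' q hq
      have h2 := pvDeg_mono hs' q
      simp only [decide_eq_true_eq]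
      omega

theorem pvSync_eq_self_of_good (L : List (Int × Int)) (hg : pvGood L) : pvSync L = L := by
  rw [pvSync]
  rw [dif_pos (by
    rw [List.length_filter_eq_length_iff]
    intro a ha
    simpa using hg a ha)]

theorem pvSync_len_discard (L : List (Int × Int)) (p : Int × Int) (hnd : L.Nodup)
    (_hp : p ∈ L) (hdeg : pvDeg L p < 4) :
    (pvSync (PySem.Set.discard L p)).length = (pvSync L).length := by
  have hsubA : pvSub (pvSync L) L := pvSync_subset L
  have hsubB : pvSub (pvSync (PySem.Set.discard L p)) (PySem.Set.discard L p) :=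
    pvSync_subset _
  have hpA : p ∉ pvSync L := by
    intro hpc
    have h1 := pvSync_good L p hpc
    have h2 := pvDeg_mono hsubA p
    omega
  have hAsub : pvSub (pvSync L) (PySem.Set.discard L p) := by
    intro q hq
    rw [PySem.Set.mem_discard]
    exact ⟨hsubA q hq, fun hc => hpA (hc ▸ hq)⟩
  have hAB : pvSub (pvSync L) (pvSync (PySem.Set.discard L p)) :=
    pvSync_max _ _ (pvSync_good L) hAsub
  have hBA : pvSub (pvSync (PySem.Set.discard L p)) (pvSync L) :=
    pvSync_max _ _ (pvSync_good _) (fun q hq =>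
      ((PySem.Set.mem_discard L p q).mp (hsubB q hq)).1)
  have hperm : (pvSync (PySem.Set.discard L p)).Perm (pvSync L) :=
    (List.perm_ext_iff_of_nodup (pvSync_nodup _ (PySem.Set.nodup_discard L p hnd))
      (pvSync_nodup _ hnd)).mpr (fun q => ⟨hBA q, hAB q⟩)
  exact hperm.length_eq

-- ---- the worklist loop computes |alive| - |4-core| ----
theorem pv_peel_eq (n : Nat) : ∀ (alive : List (Int × Int))
    (deg : PySem.Dict (Int × Int) Int) (queue : List (Int × Int)) (removed : Int),
    9 * alive.length + queue.length ≤ n →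
    alive.Nodup →
    (∀ q ∈ alive, deg.getD q 0 = pvDeg alive q) →
    (∀ q ∈ alive, pvDeg alive q < 4 → q ∈ queue) →
    (∀ q ∈ queue, q ∈ alive → pvDeg alive q < 4) →
    pvPeelLoop alive deg queue removed
      = removed + (alive.length : Int) - ((pvSync alive).length : Int) := by
  induction n with
  | zero =>
    intro alive deg queue removed hn hnd hdeg hcomp hsound
    have ha : alive = [] := List.eq_nil_of_length_eq_zero (by omega)
    have hq : queue = [] := List.eq_nil_of_length_eq_zero (by omega)
    subst ha; subst hq
    rw [pvPeelLoop, pvSync_eq_self_of_good [] (by intro q hq; simp at hq)]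
    simp
  | succ n ih =>
    intro alive deg queue removed hn hnd hdeg hcomp hsound
    match queue with
    | [] =>
      rw [pvPeelLoop]
      have hgood : pvGood alive := by
        intro q hq
        by_contra hlt
        exact absurd (hcomp q hq (by omega)) (List.not_mem_nil)
      rw [pvSync_eq_self_of_good alive hgood]
      simp
    | p :: rest =>
      rw [pvPeelLoop]
      by_cases hp : p ∈ alive
      · rw [dif_pos hp]
        have hpdeg : pvDeg alive p < 4 := hsound p List.mem_cons_self hp
        set alive' := PySem.Set.discard alive p with halive'
        have hnd' : alive'.Nodup := PySem.Set.nodup_discard alive p hnd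
        have hlen' : alive'.length + 1 = alive.length := pv_discard_len hnd hp
        obtain ⟨hf1, hf2⟩ := pv_peelfold alive' p pvDirs pvDirs_nodup deg rest
        have hmem' : ∀ q, q ∈ alive' ↔ q ∈ alive ∧ q ≠ p := fun q =>
          PySem.Set.mem_discard alive p q
        -- the appended queue entries
        have happend : ((pvDirs.filter (fun dd => decide ((p.1 + dd.1, p.2 + dd.2) ∈ alive'
              ∧ deg.getD (p.1 + dd.1, p.2 + dd.2) 0 = 4))).map
            (fun dd => (p.1 + dd.1, p.2 + dd.2))).length ≤ 8 := by
          calc _ = (pvDirs.filter _).length := List.length_map ..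
            _ ≤ pvDirs.length := List.length_filter_le _ _
            _ = 8 := rfl
        -- new degree facts
        have hdeg' : ∀ q ∈ alive',
            ((pvDirs.foldl (pvPeelStep alive' p) (deg, rest)).1).getD q 0 = pvDeg alive' q := by
          intro q hq
          obtain ⟨hqa, hqp⟩ := (hmem' q).mp hq
          rw [hf1 q, pvDeg_discard alive p q hp, ← hdeg q hqa]
          by_cases hadj : (q.1 - p.1, q.2 - p.2) ∈ pvDirs
          · rw [if_pos ⟨hadj, hq⟩, if_pos (pvDirs_sub_comm.mpr hadj)]
          · rw [if_neg (by rintro ⟨h1, _⟩; exact hadj h1),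
              if_neg (fun hc => hadj (pvDirs_sub_comm.mp hc))]
            omega
        -- appended-membership characterisation
        have happmem : ∀ q : Int × Int,
            q ∈ (pvDirs.filter (fun dd => decide ((p.1 + dd.1, p.2 + dd.2) ∈ alive'
                ∧ deg.getD (p.1 + dd.1, p.2 + dd.2) 0 = 4))).map
              (fun dd => (p.1 + dd.1, p.2 + dd.2))
              ↔ (q.1 - p.1, q.2 - p.2) ∈ pvDirs ∧ q ∈ alive' ∧ pvDeg alive q = 4 := by
          intro q
          simp only [List.mem_map, List.mem_filter, decide_eq_true_eq]
          constructor
          · rintro ⟨dd, ⟨hdd, hin, h4⟩, rfl⟩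
            have hqa := ((hmem' _).mp hin).1
            refine ⟨?_, hin, by rw [← hdeg _ hqa]; exact h4⟩
            have : ((p.1 + dd.1) - p.1, (p.2 + dd.2) - p.2) = dd := Prod.ext (by simp) (by simp)
            rw [this]; exact hdd
          · rintro ⟨hadj, hin, h4⟩
            refine ⟨(q.1 - p.1, q.2 - p.2), ⟨hadj, ?_, ?_⟩, Prod.ext (by simp) (by simp)⟩
            · simpa using hin
            · have hqa := ((hmem' q).mp hin).1
              rw [show (p.1 + (q.1 - p.1), p.2 + (q.2 - p.2)) = q from
                Prod.ext (by simp) (by simp), hdeg q hqa]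
              exact h4
        rw [ih alive' _ _ (removed + 1) ?_ hnd' hdeg' ?_ ?_]
        · rw [pvSync_len_discard alive p hnd hp hpdeg]
          omega
        · -- measure
          rw [hf2]
          simp only [List.length_append, List.length_cons] at hn ⊢
          omega
        · -- completeness of the new queue
          intro q hq hlt
          obtain ⟨hqa, hqp⟩ := (hmem' q).mp hq
          rw [hf2, List.mem_append]
          by_cases hold : pvDeg alive q < 4
          · left
            have := hcomp q hqa hold
            rcases List.mem_cons.mp this with rfl | h
            · exact absurd rfl hqp
            · exact h
          · right
            rw [happmem q]
            have hd := pvDeg_discard alive p q hp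
            rw [← halive'] at hd
            by_cases hadj : (p.1 - q.1, p.2 - q.2) ∈ pvDirs
            · rw [if_pos hadj] at hd
              exact ⟨pvDirs_sub_comm.mpr hadj, hq, by omega⟩
            · rw [if_neg hadj] at hd
              omega
        · -- soundness of the new queue
          intro q hq hqa'
          rw [hf2, List.mem_append] at hq
          have hd := pvDeg_discard alive p q hp
          rw [← halive'] at hd
          rcases hq with hq | hq
          · have hqa := ((hmem' q).mp hqa').1
            have := hsound q (List.mem_cons_of_mem _ hq) hqa
            split at hd <;> omega
          · obtain ⟨hadj, _, h4⟩ := (happmem q).mp hq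
            rw [if_pos (pvDirs_sub_comm.mp hadj)] at hd
            omega
      · rw [dif_neg hp]
        refine ih alive deg rest removed (by simp at hn; omega) hnd hdeg ?_ ?_
        · intro q hq hlt
          rcases List.mem_cons.mp (hcomp q hq hlt) with rfl | h
          · exact absurd hq hp
          · exact h
        · intro q hq hqa
          exact hsound q (List.mem_cons_of_mem _ hq) hqa

-- ===== VERDICT (by name: the statement is the Claim_ definition above) =====
theorem part_two_spec : Claim_equal_part_two := by
  unfold Claim_equal_part_two
  intro data _ _
  unfold Spec_part_two part_two part_two_alt
  have hnd := pv_nodup_cells data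
  have hinv : pvInv data (pvCells data) := ⟨hnd, fun p => pv_mem_cells data p⟩
  rw [pv_loop_eq (pvCells data).length data (pvCells data) 0 le_rfl hinv]
  by_cases hd : data = []
  · subst hd
    have h0 : pvCells ([] : List (List String)) = [] := by
      unfold pvCells
      simp [pvH, PySem.List.len_eq, PySem.List.pyRange_one_eq_nil]
    rw [if_pos rfl, h0, pvSync_eq_self_of_good [] (by intro q hq; simp at hq)]
    simp
  · rw [if_neg hd, PySem.Set.ofList_eq_self_of_nodup _ hnd]
    obtain ⟨hi1, hi2⟩ := pv_initDQ_spec (pvCells data) (pvCells data) (PySem.Dict.empty, [])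
    rw [show pvInitDQ (pvCells data) (pvCells data)
        = ((pvCells data).foldl (fun st p =>
            (PySem.Dict.insert st.1 p (pvDeg (pvCells data) p),
             if pvDeg (pvCells data) p < 4 then st.2 ++ [p] else st.2))
          (PySem.Dict.empty, ([] : List (Int × Int)))) from rfl]
    rw [pv_peel_eq (9 * (pvCells data).length + ((pvCells data).foldl (fun st p =>
            (PySem.Dict.insert st.1 p (pvDeg (pvCells data) p),
             if pvDeg (pvCells data) p < 4 then st.2 ++ [p] else st.2))
          (PySem.Dict.empty, ([] : List (Int × Int)))).2.length) _ _ _ _ le_rfl hnd ?_ ?_ ?_]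
    · intro q hq
      rw [hi1 q, if_pos hq]
    · intro q hq hlt
      rw [hi2]
      simp only [List.nil_append, List.mem_filter, decide_eq_true_eq]
      exact ⟨hq, hlt⟩
    · intro q hq _
      rw [hi2] at hq
      simp only [List.nil_append, List.mem_filter, decide_eq_true_eq] at hq
      exact hq.2
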